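-- pv_equiv track=rewrite | github.com/leotappe/aoc-2023 | day-21/part_2.py | solve_quadrant
-- ===== SOURCE A (Python) =====
-- import itertools
--
-- def solve_quadrant(grid, steps, dists_from_anchor):
--     d = len(grid)
--     reachable_plots = 0
--
--     # Precompute stuff
--     max_dist_from_anchor = max(n for row in dists_from_anchor for n in row if n is not None)
--     reachable_up_to = []
--     for n in range(max_dist_from_anchor + 1):
--         even = sum(m % 2 == 0 for row in dists_from_anchor for m in row if m is not None and m <= n)
--         odd = sum(m % 2 == 1 for row in dists_from_anchor for m in row if m is not None and m <= n)
--         reachable_up_to.append([even, odd])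
--
--     odd = sum(1 for row in dists_from_anchor for n in row if n is not None and n % 2 == 1)
--     even = sum(1 for row in dists_from_anchor for n in row if n is not None and n % 2 == 0)
--
--     for row in itertools.count():
--         dist_to_anchor = d + 1 + row * d
--         if steps < dist_to_anchor:
--             break
--
--         remaining_steps = steps - dist_to_anchor
--         base_parity = (row + 1) % 2
--
--         if remaining_steps < max_dist_from_anchor:
--             completely_traversable_copies = 0
--         else:
--             completely_traversable_copies = (remaining_steps - max_dist_from_anchor) // d + 1
--
--         if base_parity == 1:
--             reachable_plots += (completely_traversable_copies // 2) * even
--             reachable_plots += (completely_traversable_copies - completely_traversable_copies // 2) * odd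
--             parity = (completely_traversable_copies + 1) % 2
--         else:
--             reachable_plots += (completely_traversable_copies // 2) * odd
--             reachable_plots += (completely_traversable_copies - completely_traversable_copies // 2) * even
--             parity = (completely_traversable_copies) % 2
--
--         remaining_steps -= completely_traversable_copies * d
--
--         while remaining_steps >= d:
--             reachable_plots += reachable_up_to[remaining_steps][parity]
--             remaining_steps -= d
--             parity = (parity + 1) % 2
--
--         reachable_plots += reachable_up_to[remaining_steps][parity]
--
--     return reachable_plots
-- ===== SOURCE B (Python) =====
-- def solve_quadrant(grid, steps, dists_from_anchor):
--     # B: one-pass bucket counting + prefix sums for the reachable table (instead of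
--     # rescanning all cells for every threshold), and a chained suffix-sum table S
--     # that replaces A's inner while loop by a single O(1) lookup per grid copy.
--     d = len(grid)
--     vals = [n for row in dists_from_anchor for n in row if n is not None]
--     max_dist = max(vals)
--
--     if steps < d + 1:
--         return 0
--
--     # bucket counts by value and parity; negatives (always <= any threshold) go to base
--     base = [0, 0]
--     buckets = [[0, 0] for _ in range(max_dist + 1)]
--     for v in vals:
--         if v < 0:
--             base[v % 2] += 1
--         else:
--             buckets[v][v % 2] += 1
--
--     # ru[n][p] = number of values m <= n with m % 2 == p  (prefix sums of buckets)
--     ru = []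
--     ce, co = base[0], base[1]
--     for n in range(max_dist + 1):
--         ce += buckets[n][0]
--         co += buckets[n][1]
--         ru.append((ce, co))
--     even, odd = ce, co  # totals over all values
--
--     # S[t][p] = ru[t][p] + ru[t-d][1-p] + ru[t-2d][p] + ...  (A's inner while loop)
--     S = []
--     for t in range(max_dist + 1):
--         e = ru[t][0] + (S[t - d][1] if t >= d else 0)
--         o = ru[t][1] + (S[t - d][0] if t >= d else 0)
--         S.append((e, o))
--
--     reachable_plots = 0
--     row = 0
--     while steps >= d + 1 + row * d:
--         remaining_steps = steps - (d + 1 + row * d)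
--         base_parity = (row + 1) % 2
--
--         if remaining_steps < max_dist:
--             copies = 0
--         else:
--             copies = (remaining_steps - max_dist) // d + 1
--
--         if base_parity == 1:
--             reachable_plots += (copies // 2) * even + (copies - copies // 2) * odd
--             parity = (copies + 1) % 2
--         else:
--             reachable_plots += (copies // 2) * odd + (copies - copies // 2) * even
--             parity = copies % 2
--
--         t = remaining_steps - copies * d
--         reachable_plots += S[t][parity]
--         row += 1
--
--     return reachable_plots
-- ===== Notes on version B (the rewrite author's own statement) =====
-- stated objective: faster
-- what changed: A rescans every grid cell for each distance threshold (O(max_dist * cells)) and walks an inner while-loop per grid copy; B counts each cell once into parity buckets, turns them into the threshold table by prefix sums, and precomputes a chained suffix table S so each grid copy costs one O(1) lookup instead of an inner loop.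
import Mathlib
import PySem

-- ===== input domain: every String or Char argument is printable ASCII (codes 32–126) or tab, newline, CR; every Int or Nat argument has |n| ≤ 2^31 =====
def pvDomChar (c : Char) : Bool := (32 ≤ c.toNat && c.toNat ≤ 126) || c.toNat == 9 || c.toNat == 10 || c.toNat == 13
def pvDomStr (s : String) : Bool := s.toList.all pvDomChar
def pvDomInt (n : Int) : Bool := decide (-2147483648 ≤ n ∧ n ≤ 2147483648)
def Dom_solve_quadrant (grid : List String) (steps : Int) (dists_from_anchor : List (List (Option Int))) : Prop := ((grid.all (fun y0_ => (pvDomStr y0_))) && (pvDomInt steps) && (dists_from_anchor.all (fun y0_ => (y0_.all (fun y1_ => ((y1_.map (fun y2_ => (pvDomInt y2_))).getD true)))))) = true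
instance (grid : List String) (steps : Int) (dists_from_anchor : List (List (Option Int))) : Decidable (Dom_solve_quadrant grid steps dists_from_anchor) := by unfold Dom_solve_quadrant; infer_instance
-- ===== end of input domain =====

-- B replaces A's per-threshold rescans of all cells by one-pass bucket counting with
-- prefix sums, and A's inner while loop by a precomputed chained suffix table (one
-- lookup per grid copy); measured objective: faster table construction / per-row work.

-- ===== PORT A =====
-- the comprehension '(n for row in dists for n in row if n is not None)'
def pvVals (dists : List (List (Option Int))) : List Int :=
  dists.flatMap (fun row => row.filterMap (fun n => n))

-- xs[i][p] for a [even, odd] pair: pyGetD is Python indexing (negative wraps, default where Python raises — excluded by Pre_)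
def pvGetPair (l : List (Int × Int)) (i : Int) : Int × Int :=
  PySem.List.pyGetD l i (0, 0)

def pvSel (pr : Int × Int) (p : Int) : Int := if p = 0 then pr.1 else pr.2

-- reachable_up_to: for n in range(max+1): append [even-count, odd-count] (full rescan per n)
def pvRuA (vals : List Int) (maxd : Int) : List (Int × Int) :=
  (PySem.List.pyRange 0 (maxd + 1) 1).map (fun n =>
    ((vals.countP (fun m => decide (m ≤ n) && decide (PySem.Int.mod m 2 = 0)) : Int),
     (vals.countP (fun m => decide (m ≤ n) && decide (PySem.Int.mod m 2 = 1)) : Int)))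

-- the inner 'while remaining_steps >= d' loop; returns (remaining_steps, parity, acc)
def pvInnerA (d : Int) (ru : List (Int × Int)) : Nat → Int → Int → Int → Int × Int × Int
  | 0, rs, par, acc => (rs, par, acc)
  | f + 1, rs, par, acc =>
    if d ≤ rs then
      pvInnerA d ru f (rs - d) (PySem.Int.mod (par + 1) 2) (acc + pvSel (pvGetPair ru rs) par)
    else (rs, par, acc)

-- the 'for row in itertools.count()' loop (fuel: the loop breaks after at most steps rows)
def pvLoopA (d maxd : Int) (ru : List (Int × Int)) (evenT oddT steps : Int) :
    Nat → Int → Int → Int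
  | 0, _, acc => acc
  | f + 1, row, acc =>
    if steps < d + 1 + row * d then acc
    else
      let rs := steps - (d + 1 + row * d)
      let copies := if rs < maxd then 0 else PySem.Int.floordiv (rs - maxd) d + 1
      let h := PySem.Int.floordiv copies 2
      let st :=
        if PySem.Int.mod (row + 1) 2 = 1 then
          (acc + h * evenT + (copies - h) * oddT, PySem.Int.mod (copies + 1) 2)
        else
          (acc + h * oddT + (copies - h) * evenT, PySem.Int.mod copies 2)
      let rs2 := rs - copies * d
      let r3 := pvInnerA d ru (rs2.toNat + 1) rs2 st.2 st.1
      pvLoopA d maxd ru evenT oddT steps f (row + 1)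
        (r3.2.2 + pvSel (pvGetPair ru r3.1) r3.2.1)

def solve_quadrant (grid : List String) (steps : Int) (dists_from_anchor : List (List (Option Int))) : Int :=
  let d : Int := grid.length
  let vals := pvVals dists_from_anchor
  let maxd := (PySem.List.max? vals (fun n => n)).getD 0   -- max(...); empty generator (ValueError) excluded by Pre_
  let ru := pvRuA vals maxd
  let oddT : Int := vals.countP (fun n => decide (PySem.Int.mod n 2 = 1))
  let evenT : Int := vals.countP (fun n => decide (PySem.Int.mod n 2 = 0))
  pvLoopA d maxd ru evenT oddT steps (steps.toNat + 1) 0 0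

-- ===== PORT B =====
-- one pass over the values: negative values to base, others bucketed by value and parity
def pvBBuckets (vals : List Int) (maxd : Int) : (Int × Int) × List (Int × Int) :=
  vals.foldl (fun st v =>
      if v < 0 then
        (if PySem.Int.mod v 2 = 0 then ((st.1.1 + 1, st.1.2), st.2)
         else ((st.1.1, st.1.2 + 1), st.2))
      else
        (st.1, st.2.set v.toNat
          (if PySem.Int.mod v 2 = 0 then ((pvGetPair st.2 v).1 + 1, (pvGetPair st.2 v).2)
           else ((pvGetPair st.2 v).1, (pvGetPair st.2 v).2 + 1))))
    ((0, 0), (PySem.List.pyRange 0 (maxd + 1) 1).map (fun _ => (0, 0)))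

-- ru as running prefix sums of the buckets; returns (totals, ru)
def pvBRu (buckets : List (Int × Int)) (base : Int × Int) (maxd : Int) :
    (Int × Int) × List (Int × Int) :=
  (PySem.List.pyRange 0 (maxd + 1) 1).foldl
    (fun st n =>
      ((st.1.1 + (pvGetPair buckets n).1, st.1.2 + (pvGetPair buckets n).2),
       st.2 ++ [(st.1.1 + (pvGetPair buckets n).1, st.1.2 + (pvGetPair buckets n).2)]))
    (base, [])

-- S[t] = ru[t] + (swapped S[t-d] if t >= d): the chained suffix table
def pvBS (d : Int) (ru : List (Int × Int)) (maxd : Int) : List (Int × Int) :=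
  (PySem.List.pyRange 0 (maxd + 1) 1).foldl
    (fun S t =>
      S ++ [((pvGetPair ru t).1 + (if d ≤ t then (pvGetPair S (t - d)).2 else 0),
             (pvGetPair ru t).2 + (if d ≤ t then (pvGetPair S (t - d)).1 else 0))])
    []

-- the 'while steps >= d + 1 + row * d' loop: one S-lookup per grid copy
def pvLoopB (d maxd : Int) (S : List (Int × Int)) (evenT oddT steps : Int) :
    Nat → Int → Int → Int
  | 0, _, acc => acc
  | f + 1, row, acc =>
    if steps < d + 1 + row * d then acc
    else
      let rs := steps - (d + 1 + row * d)
      let copies := if rs < maxd then 0 else PySem.Int.floordiv (rs - maxd) d + 1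
      let h := PySem.Int.floordiv copies 2
      let st :=
        if PySem.Int.mod (row + 1) 2 = 1 then
          (acc + h * evenT + (copies - h) * oddT, PySem.Int.mod (copies + 1) 2)
        else
          (acc + h * oddT + (copies - h) * evenT, PySem.Int.mod copies 2)
      pvLoopB d maxd S evenT oddT steps f (row + 1)
        (st.1 + pvSel (pvGetPair S (rs - copies * d)) st.2)

def solve_quadrant_alt (grid : List String) (steps : Int) (dists_from_anchor : List (List (Option Int))) : Int :=
  let d : Int := grid.length
  let vals := pvVals dists_from_anchor
  let maxd := (PySem.List.max? vals (fun n => n)).getD 0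
  if steps < d + 1 then 0
  else
    let bb := pvBBuckets vals maxd
    let rr := pvBRu bb.2 bb.1 maxd
    pvLoopB d maxd (pvBS d rr.2 maxd) rr.1.1 rr.1.2 steps (steps.toNat + 1) 0 0

-- ===== PRECONDITION & SPEC =====
def pvMaxDist (dists : List (List (Option Int))) : Int :=
  (PySem.List.max? (pvVals dists) (fun n => n)).getD 0

-- Pre_ is exactly the set of inputs on which the Python A returns: it excludes only
-- raising inputs — no non-None distance (max() ValueError), an empty grid with the
-- loop entered (division by zero / divergence), and steps large enough that the final
-- negative index falls below -len(reachable_up_to) (IndexError).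
def Pre_solve_quadrant (grid : List String) (steps : Int) (dists_from_anchor : List (List (Option Int))) : Prop :=
  pvVals dists_from_anchor ≠ [] ∧
  (steps < (grid.length : Int) + 1 ∨
    (1 ≤ (grid.length : Int) ∧
      (steps - (grid.length : Int) - 1 < pvMaxDist dists_from_anchor ∨
       (grid.length : Int) - 2 * pvMaxDist dists_from_anchor - 1 ≤
         PySem.Int.mod (steps - 1 - pvMaxDist dists_from_anchor) (grid.length : Int))))
instance (grid : List String) (steps : Int) (dists_from_anchor : List (List (Option Int))) : Decidable (Pre_solve_quadrant grid steps dists_from_anchor) := by unfold Pre_solve_quadrant; infer_instance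

def pvWitness_solve_quadrant : List String × Int × List (List (Option Int)) :=
  (["."], 3, [[some 1]])

def Spec_solve_quadrant (grid : List String) (steps : Int) (dists_from_anchor : List (List (Option Int))) (out : Int) : Prop := out = solve_quadrant_alt grid steps dists_from_anchor
instance (grid : List String) (steps : Int) (dists_from_anchor : List (List (Option Int))) (out : Int) : Decidable (Spec_solve_quadrant grid steps dists_from_anchor out) := by unfold Spec_solve_quadrant; infer_instance

-- ===== CLAIM (what is proved, stated in full; the proofs are below) =====
def Claim_equal_solve_quadrant : Prop := ∀ (grid : List String) (steps : Int) (dists_from_anchor : List (List (Option Int))), Dom_solve_quadrant grid steps dists_from_anchor → Pre_solve_quadrant grid steps dists_from_anchor → Spec_solve_quadrant grid steps dists_from_anchor (solve_quadrant grid steps dists_from_anchor)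

-- ===== LEMMAS AND PROOFS =====

-- proof-side abbreviations: the counting functions the tables tabulate
def pvCnt (vals : List Int) (p n : Int) : Int :=
  vals.countP (fun m => decide (m ≤ n) && decide (PySem.Int.mod m 2 = p))
def pvCntEq (vals : List Int) (p n : Int) : Int :=
  vals.countP (fun m => decide (m = n) && decide (PySem.Int.mod m 2 = p))
def pvCntAll (vals : List Int) (p : Int) : Int :=
  vals.countP (fun m => decide (PySem.Int.mod m 2 = p))
def pvPair (vals : List Int) (n : Int) : Int × Int := (pvCnt vals 0 n, pvCnt vals 1 n)

-- the value of A's inner while loop / B's chained table, by strong recursion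
def pvSfun (vals : List Int) (d' : Nat) (t : Nat) : Int × Int :=
  if 1 ≤ d' ∧ d' ≤ t then
    ((pvCnt vals 0 t) + (pvSfun vals d' (t - d')).2,
     (pvCnt vals 1 t) + (pvSfun vals d' (t - d')).1)
  else pvPair vals t
termination_by t
decreasing_by omega

theorem pvCnt_succ (vals : List Int) (p n : Int) :
    pvCnt vals p n = pvCnt vals p (n - 1) + pvCntEq vals p n := by
  induction vals with
  | nil => simp [pvCnt, pvCntEq]
  | cons v vs ih =>
    simp only [pvCnt, pvCntEq, List.countP_cons] at ih ⊢
    by_cases h2 : PySem.Int.mod v 2 = p <;> by_cases h1 : v ≤ n - 1 <;> by_cases h3 : v = n <;>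
      simp only [h1, h2, h3, decide_true, decide_false, Bool.and_true, Bool.and_false,
        if_true, decide_eq_true_eq, Nat.cast_add] <;>
      simp_all [show v ≤ n ↔ (v ≤ n - 1 ∨ v = n) by omega] <;> omega

theorem pvCnt_all (vals : List Int) (p c : Int) (h : ∀ m ∈ vals, m ≤ c) :
    pvCnt vals p c = pvCntAll vals p := by
  unfold pvCnt pvCntAll
  congr 1
  apply List.countP_congr
  intro m hm
  simp [h m hm]

-- lookup of a nonnegative in-range index in a tabulated function
theorem pvGet_map_range (f : Nat → Int × Int) (N : Nat) (n : Nat) (hn : n < N) :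
    pvGetPair ((List.range N).map f) (n : Int) = f n := by
  unfold pvGetPair
  rw [PySem.List.pyGetD_eq_getElem _ _ (by omega) (by simp; omega)]
  simp

theorem pvBuckets_eq (vals : List Int) (maxd : Int) (hle : ∀ m ∈ vals, m ≤ maxd) :
    pvBBuckets vals maxd =
      ((pvCnt vals 0 (-1), pvCnt vals 1 (-1)),
       (List.range (maxd + 1).toNat).map (fun (k : Nat) => (pvCntEq vals 0 (k : Int), pvCntEq vals 1 (k : Int)))) := by
  induction vals using List.reverseRecOn with
  | nil =>
    simp [pvBBuckets, pvCnt, pvCntEq, PySem.List.pyRange_one, List.map_map, Function.comp_def]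
  | append_singleton vs v ih =>
    have hv : v ≤ maxd := hle v (by simp)
    have ihh := ih (fun m hm => hle m (by simp [hm]))
    unfold pvBBuckets at ihh ⊢
    rw [List.foldl_append, ihh, List.foldl_cons, List.foldl_nil]
    by_cases hv0 : v < 0
    · simp only [if_pos hv0]
      have hbase : ∀ p, pvCnt (vs ++ [v]) p (-1)
          = pvCnt vs p (-1) + (if PySem.Int.mod v 2 = p then 1 else 0) := by
        intro p
        simp [pvCnt, List.countP_append, List.countP_cons, show v ≤ -1 by omega]
      have hmap : (List.range (maxd + 1).toNat).map
            (fun (k : Nat) => (pvCntEq (vs ++ [v]) 0 (k : Int), pvCntEq (vs ++ [v]) 1 (k : Int)))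
          = (List.range (maxd + 1).toNat).map
            (fun (k : Nat) => (pvCntEq vs 0 (k : Int), pvCntEq vs 1 (k : Int))) := by
        apply List.map_congr_left
        intro k _
        have : v ≠ (k : Int) := by omega
        simp [pvCntEq, List.countP_append, this]
      rw [hmap]
      have hmod : PySem.Int.mod v 2 = 0 ∨ PySem.Int.mod v 2 = 1 := by
        have h1 := PySem.Int.mod_nonneg v (b := 2) (by omega)
        have h2 := PySem.Int.mod_lt v (b := 2) (by omega)
        omega
      have e0 := hbase 0; have e1 := hbase 1
      rcases hmod with h | h
      · rw [if_pos h]; rw [h] at e0 e1; simp only [reduceIte] at e0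
        rw [if_neg (by omega : ¬ ((0:Int) = 1))] at e1; simp only [add_zero] at e1
        rw [e0, e1]
      · rw [if_neg (by omega)]; rw [h] at e0 e1
        rw [if_neg (by omega : ¬ ((1:Int) = 0))] at e0; simp only [add_zero] at e0
        simp only [reduceIte] at e1
        rw [e0, e1]
    · have hv0 : 0 ≤ v := by omega
      simp only [if_neg (by omega : ¬ v < 0)]
      have hmaxd : 0 ≤ maxd := le_trans hv0 hv
      have hN : ((maxd + 1).toNat : Int) = maxd + 1 := by omega
      have hvlen : v.toNat < (maxd + 1).toNat := by omega
      have hget : pvGetPair ((List.range (maxd + 1).toNat).map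
            (fun (k : Nat) => (pvCntEq vs 0 (k : Int), pvCntEq vs 1 (k : Int)))) v
          = (pvCntEq vs 0 v, pvCntEq vs 1 v) := by
        unfold pvGetPair
        rw [PySem.List.pyGetD_eq_getElem _ _ hv0 (by simp only [List.length_map, List.length_range]; omega)]
        simp [Int.toNat_of_nonneg hv0]
      have hbase : ∀ p, pvCnt (vs ++ [v]) p (-1) = pvCnt vs p (-1) := by
        intro p
        simp [pvCnt, List.countP_append, show ¬ v ≤ -1 by omega]
      have hmod : PySem.Int.mod v 2 = 0 ∨ PySem.Int.mod v 2 = 1 := by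
        have h1 := PySem.Int.mod_nonneg v (b := 2) (by omega)
        have h2 := PySem.Int.mod_lt v (b := 2) (by omega)
        omega
      have hcntEq : ∀ p (k : Nat), pvCntEq (vs ++ [v]) p (k : Int)
          = pvCntEq vs p (k : Int) + (if v = (k : Int) ∧ PySem.Int.mod v 2 = p then 1 else 0) := by
        intro p k
        simp only [pvCntEq, List.countP_append, List.countP_cons, List.countP_nil]
        by_cases hc : v = (k : Int) ∧ PySem.Int.mod v 2 = p
        · have hb : (decide (v = (k : Int)) && decide (PySem.Int.mod v 2 = p)) = true := by
            rw [decide_eq_true hc.1, decide_eq_true hc.2]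
            rfl
          rw [if_pos hc, hb]
          simp [add_comm]
        · have hb : (decide (v = (k : Int)) && decide (PySem.Int.mod v 2 = p)) = false := by
            rcases not_and_or.mp hc with h | h
            · rw [decide_eq_false h, Bool.false_and]
            · rw [decide_eq_false h, Bool.and_false]
          rw [if_neg hc, hb]
          simp
      have hset : (((List.range (maxd + 1).toNat).map
            (fun (k : Nat) => (pvCntEq vs 0 (k : Int), pvCntEq vs 1 (k : Int)))).set v.toNat
            (if PySem.Int.mod v 2 = 0 then (pvCntEq vs 0 v + 1, pvCntEq vs 1 v)
             else (pvCntEq vs 0 v, pvCntEq vs 1 v + 1)))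
          = (List.range (maxd + 1).toNat).map
            (fun (k : Nat) => (pvCntEq (vs ++ [v]) 0 (k : Int), pvCntEq (vs ++ [v]) 1 (k : Int))) := by
        apply List.ext_getElem
        · simp
        · intro i hi1 hi2
          simp only [List.length_set, List.length_map, List.length_range] at hi1
          rw [List.getElem_set]
          by_cases heq : v.toNat = i
          · subst heq
            have hvk : ((v.toNat : Nat) : Int) = v := Int.toNat_of_nonneg hv0
            have e0 := hcntEq 0 v.toNat
            have e1 := hcntEq 1 v.toNat
            rw [hvk] at e0 e1
            simp only [List.getElem_map, List.getElem_range, hvk, e0, e1]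
            rcases hmod with h | h <;> simp only [h] <;> norm_num
          · have hne : v ≠ (i : Int) := by omega
            simp [heq, hcntEq, hne]
      simp only [hget]
      rw [Prod.ext_iff]
      constructor
      · simp [hbase]
      · simpa using hset

theorem pvBRu_aux (vals : List Int) (maxd : Int) (N : Nat) (hN : N = (maxd + 1).toNat) :
    ∀ n, n ≤ N →
    (((List.range n).map (fun (k : Nat) => ((k : Int)))).foldl
      (fun (st : (Int × Int) × List (Int × Int)) m =>
        ((st.1.1 + (pvGetPair ((List.range N).map (fun (k : Nat) => (pvCntEq vals 0 (k : Int), pvCntEq vals 1 (k : Int)))) m).1,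
          st.1.2 + (pvGetPair ((List.range N).map (fun (k : Nat) => (pvCntEq vals 0 (k : Int), pvCntEq vals 1 (k : Int)))) m).2),
         st.2 ++ [(st.1.1 + (pvGetPair ((List.range N).map (fun (k : Nat) => (pvCntEq vals 0 (k : Int), pvCntEq vals 1 (k : Int)))) m).1,
                   st.1.2 + (pvGetPair ((List.range N).map (fun (k : Nat) => (pvCntEq vals 0 (k : Int), pvCntEq vals 1 (k : Int)))) m).2)]))
      ((pvCnt vals 0 (-1), pvCnt vals 1 (-1)), []))
    = ((pvCnt vals 0 ((n : Int) - 1), pvCnt vals 1 ((n : Int) - 1)),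
       (List.range n).map (fun (k : Nat) => pvPair vals (k : Int))) := by
  intro n hn
  induction n with
  | zero => simp
  | succ m ih =>
    rw [List.range_succ, List.map_append, List.foldl_append, ih (by omega)]
    simp only [List.map_cons, List.map_nil, List.foldl_cons, List.foldl_nil]
    rw [pvGet_map_range _ _ _ (by omega)]
    have e0 := pvCnt_succ vals 0 (m : Int)
    have e1 := pvCnt_succ vals 1 (m : Int)
    simp only [List.map_append, List.map_cons, List.map_nil, pvPair,
      Nat.cast_succ, show ((m : Int) + 1 - 1) = (m : Int) by ring, e0, e1]

theorem pvBS_aux (vals : List Int) (d maxd : Int) (hd : 1 ≤ d) (N : Nat) (hN : N = (maxd + 1).toNat) :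
    ∀ n, n ≤ N →
    (((List.range n).map (fun (k : Nat) => ((k : Int)))).foldl
      (fun (S : List (Int × Int)) t =>
        S ++ [((pvGetPair ((List.range N).map (fun (k : Nat) => pvPair vals (k : Int))) t).1 +
                 (if d ≤ t then (pvGetPair S (t - d)).2 else 0),
               (pvGetPair ((List.range N).map (fun (k : Nat) => pvPair vals (k : Int))) t).2 +
                 (if d ≤ t then (pvGetPair S (t - d)).1 else 0))])
      [])
    = (List.range n).map (fun (t : Nat) => pvSfun vals d.toNat t) := by
  intro n hn
  induction n with
  | zero => simp
  | succ m ih =>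
    rw [List.range_succ, List.map_append, List.foldl_append, ih (by omega)]
    simp only [List.map_cons, List.map_nil, List.foldl_cons, List.foldl_nil]
    rw [pvGet_map_range _ _ _ (by omega)]
    simp only [List.map_append]
    congr 1
    simp only [List.map_cons, List.map_nil]
    congr 1
    by_cases hdm : d ≤ (m : Int)
    · have hcast : ((m : Int) - d) = ((m - d.toNat : Nat) : Int) := by omega
      rw [if_pos hdm, if_pos hdm, hcast,
        pvGet_map_range (fun t => pvSfun vals d.toNat t) m (m - d.toNat) (by omega)]
      conv_rhs => rw [pvSfun]
      rw [if_pos (by omega : 1 ≤ d.toNat ∧ d.toNat ≤ m)]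
      rfl
    · rw [if_neg hdm, if_neg hdm]
      conv_rhs => rw [pvSfun]
      rw [if_neg (by omega : ¬ (1 ≤ d.toNat ∧ d.toNat ≤ m))]
      simp [pvPair]

theorem pvInnerA_eq (vals : List Int) (d maxd : Int) (hd : 1 ≤ d)
    (t : Nat) (ht : (t : Int) < maxd + 1) (par acc : Int) (hpar : par = 0 ∨ par = 1)
    (fuel : Nat) (hf : t + 1 ≤ fuel) :
    (pvInnerA d ((List.range (maxd + 1).toNat).map (fun (k : Nat) => pvPair vals (k : Int))) fuel (t : Int) par acc).2.2
      + pvSel (pvGetPair ((List.range (maxd + 1).toNat).map (fun (k : Nat) => pvPair vals (k : Int)))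
          (pvInnerA d ((List.range (maxd + 1).toNat).map (fun (k : Nat) => pvPair vals (k : Int))) fuel (t : Int) par acc).1)
          (pvInnerA d ((List.range (maxd + 1).toNat).map (fun (k : Nat) => pvPair vals (k : Int))) fuel (t : Int) par acc).2.1
      = acc + pvSel (pvSfun vals d.toNat t) par := by
  induction t using Nat.strong_induction_on generalizing par acc fuel with
  | _ t IH =>
  cases fuel with
  | zero => omega
  | succ f =>
    have htN : t < (maxd + 1).toNat := by omega
    by_cases hdt : d ≤ (t : Int)
    · have hcast : ((t : Int) - d) = ((t - d.toNat : Nat) : Int) := by omega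
      have hstep : ∀ p a, pvInnerA d ((List.range (maxd + 1).toNat).map (fun (k : Nat) => pvPair vals (k : Int))) (f + 1) (t : Int) p a
          = pvInnerA d ((List.range (maxd + 1).toNat).map (fun (k : Nat) => pvPair vals (k : Int))) f ((t - d.toNat : Nat) : Int) (PySem.Int.mod (p + 1) 2)
              (a + pvSel (pvGetPair ((List.range (maxd + 1).toNat).map (fun (k : Nat) => pvPair vals (k : Int))) (t : Int)) p) := by
        intro p a
        rw [← hcast]
        simp only [pvInnerA, if_pos hdt]
      have hparn : PySem.Int.mod (par + 1) 2 = 0 ∨ PySem.Int.mod (par + 1) 2 = 1 := by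
        rcases hpar with h | h <;> subst h <;> [right; left] <;> decide
      rw [hstep]
      rw [IH (t - d.toNat) (by omega) (by omega) _ _ hparn f (by omega)]
      rw [pvGet_map_range _ _ _ htN]
      conv_rhs => rw [pvSfun]
      rw [if_pos (by omega : 1 ≤ d.toNat ∧ d.toNat ≤ t)]
      rcases hpar with h | h <;> subst h <;>
        simp [pvSel, pvPair] <;> ring
    · simp only [pvInnerA, if_neg hdt]
      rw [pvGet_map_range _ _ _ htN]
      conv_rhs => rw [pvSfun]
      rw [if_neg (by omega : ¬ (1 ≤ d.toNat ∧ d.toNat ≤ t))]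

theorem pvRow_eq (vals : List Int) (d maxd : Int) (hd : 1 ≤ d) (rs2 par acc : Int)
    (hpar : par = 0 ∨ par = 1) (hub : rs2 < maxd + 1)
    (hlb : maxd - d ≤ rs2 ∨ 0 ≤ rs2) :
    (pvInnerA d ((List.range (maxd + 1).toNat).map (fun (k : Nat) => pvPair vals (k : Int))) (rs2.toNat + 1) rs2 par acc).2.2
      + pvSel (pvGetPair ((List.range (maxd + 1).toNat).map (fun (k : Nat) => pvPair vals (k : Int)))
          (pvInnerA d ((List.range (maxd + 1).toNat).map (fun (k : Nat) => pvPair vals (k : Int))) (rs2.toNat + 1) rs2 par acc).1)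
          (pvInnerA d ((List.range (maxd + 1).toNat).map (fun (k : Nat) => pvPair vals (k : Int))) (rs2.toNat + 1) rs2 par acc).2.1
      = acc + pvSel (pvGetPair ((List.range (maxd + 1).toNat).map (fun (t : Nat) => pvSfun vals d.toNat t)) rs2) par := by
  by_cases h0 : 0 ≤ rs2
  · have hts : rs2 = ((rs2.toNat : Nat) : Int) := by omega
    have htN : rs2.toNat < (maxd + 1).toNat := by omega
    rw [hts, pvGet_map_range _ _ _ htN, pvInnerA_eq vals d maxd hd rs2.toNat (by omega) par acc hpar _ (by omega)]
  · -- rs2 < 0: the inner while loop is skipped; both sides read one (possibly wrapping) entry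
    have hneg : rs2 < 0 := by omega
    have hmd : maxd - d ≤ rs2 := by rcases hlb with h | h; exact h; omega
    have hstep : pvInnerA d ((List.range (maxd + 1).toNat).map (fun (k : Nat) => pvPair vals (k : Int))) (rs2.toNat + 1) rs2 par acc = (rs2, par, acc) := by
      have : rs2.toNat = 0 := by omega
      rw [this]
      simp only [pvInnerA, if_neg (by omega : ¬ d ≤ rs2)]
    rw [hstep]
    by_cases hmneg : maxd < 0
    · have : (maxd + 1).toNat = 0 := by omega
      rw [this]
      simp
    · have hN : ((maxd + 1).toNat : Int) = maxd + 1 := by omega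
      by_cases hrange : -(maxd + 1) ≤ rs2
      · -- wrapping negative index: both tables agree there because maxd < d
        have hk1 : 0 < (-rs2).toNat := by omega
        have hk2 : (-rs2).toNat ≤ ((List.range (maxd + 1).toNat).map (fun (k : Nat) => pvPair vals (k : Int))).length := by
          simp; omega
        have hk2' : (-rs2).toNat ≤ ((List.range (maxd + 1).toNat).map (fun (t : Nat) => pvSfun vals d.toNat t)).length := by
          simp; omega
        have hrs : rs2 = -(((-rs2).toNat : Nat) : Int) := by omega
        unfold pvGetPair
        rw [hrs, PySem.List.pyGetD_neg_natCast _ _ _ hk1 hk2,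
          PySem.List.pyGetD_neg_natCast _ _ _ hk1 hk2']
        simp only [List.length_map, List.length_range, List.getElem_map, List.getElem_range]
        have hidx : (maxd + 1).toNat - (-rs2).toNat < d.toNat := by omega
        rw [pvSfun, if_neg (by omega : ¬ (1 ≤ d.toNat ∧ d.toNat ≤ (maxd + 1).toNat - (-rs2).toNat))]
      · -- below -len: both lookups are the (excluded-by-Pre_) default
        unfold pvGetPair
        rw [PySem.List.pyGetD_of_none, PySem.List.pyGetD_of_none]
        · rw [PySem.List.pyGet?_eq_none_iff]
          intro hin
          rcases hin with ⟨h1, h2⟩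
          simp at h1 h2
          omega
        · rw [PySem.List.pyGet?_eq_none_iff]
          intro hin
          rcases hin with ⟨h1, h2⟩
          simp at h1 h2
          omega

theorem pvLoop_eq (vals : List Int) (d maxd evenT oddT steps : Int) (hd : 1 ≤ d)
    (fuel : Nat) (row acc : Int) :
    pvLoopA d maxd ((List.range (maxd + 1).toNat).map (fun (k : Nat) => pvPair vals (k : Int))) evenT oddT steps fuel row acc
      = pvLoopB d maxd ((List.range (maxd + 1).toNat).map (fun (t : Nat) => pvSfun vals d.toNat t)) evenT oddT steps fuel row acc := by
  induction fuel generalizing row acc with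
  | zero => rfl
  | succ f ihf =>
    simp only [pvLoopA, pvLoopB]
    by_cases hbrk : steps < d + 1 + row * d
    · rw [if_pos hbrk, if_pos hbrk]
    · rw [if_neg hbrk, if_neg hbrk]
      set rs := steps - (d + 1 + row * d) with hrs
      have hrs0 : 0 ≤ rs := by omega
      set copies := if rs < maxd then 0 else PySem.Int.floordiv (rs - maxd) d + 1 with hcop
      have hbnd : maxd - d ≤ rs - copies * d ∨ 0 ≤ rs - copies * d := by
        by_cases hc : rs < maxd
        · right
          rw [hcop, if_pos hc]
          simp
          omega
        · left
          rw [hcop, if_neg hc]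
          have := PySem.Int.floordiv_mul_add_mod (rs - maxd) d
          have := PySem.Int.mod_nonneg (rs - maxd) (b := d) (by omega)
          have := PySem.Int.mod_lt (rs - maxd) (b := d) (by omega)
          nlinarith [PySem.Int.floordiv_mul_add_mod (rs - maxd) d]
      have hub : rs - copies * d < maxd + 1 := by
        by_cases hc : rs < maxd
        · rw [hcop, if_pos hc]
          simp
          omega
        · rw [hcop, if_neg hc]
          have h1 := PySem.Int.floordiv_mul_add_mod (rs - maxd) d
          have h2 := PySem.Int.mod_nonneg (rs - maxd) (b := d) (by omega)
          have h3 := PySem.Int.mod_lt (rs - maxd) (b := d) (by omega)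
          nlinarith
      have hparst : ∀ c : Int, PySem.Int.mod c 2 = 0 ∨ PySem.Int.mod c 2 = 1 := by
        intro c
        have := PySem.Int.mod_nonneg c (b := 2) (by omega)
        have := PySem.Int.mod_lt c (b := 2) (by omega)
        omega
      by_cases hbp : PySem.Int.mod (row + 1) 2 = 1
      · rw [if_pos hbp]
        rw [pvRow_eq vals d maxd hd (rs - copies * d) _ _ (hparst _) hub hbnd]
        exact ihf (row + 1) _
      · rw [if_neg hbp]
        rw [pvRow_eq vals d maxd hd (rs - copies * d) _ _ (hparst _) hub hbnd]
        exact ihf (row + 1) _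

theorem pvTot (vals : List Int) (p maxd : Int) (hle : ∀ m ∈ vals, m ≤ maxd) :
    pvCnt vals p ((((maxd + 1).toNat : Nat) : Int) - 1) = pvCntAll vals p := by
  by_cases h : 0 ≤ maxd
  · have e : ((((maxd + 1).toNat : Nat)) : Int) - 1 = maxd := by omega
    rw [e]; exact pvCnt_all _ _ _ hle
  · have e : ((((maxd + 1).toNat : Nat)) : Int) - 1 = -1 := by omega
    rw [e]; exact pvCnt_all _ _ _ (fun m hm => by have := hle m hm; omega)

theorem pvRuA_eq (vals : List Int) (maxd : Int) :
    pvRuA vals maxd = (List.range (maxd + 1).toNat).map (fun (k : Nat) => pvPair vals (k : Int)) := by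
  simp [pvRuA, PySem.List.pyRange_one, List.map_map, pvPair, pvCnt, Function.comp_def]

theorem pvBRu_eq (vals : List Int) (maxd : Int) (hle : ∀ m ∈ vals, m ≤ maxd) :
    pvBRu (pvBBuckets vals maxd).2 (pvBBuckets vals maxd).1 maxd =
      ((pvCntAll vals 0, pvCntAll vals 1),
       (List.range (maxd + 1).toNat).map (fun (k : Nat) => pvPair vals (k : Int))) := by
  rw [pvBuckets_eq vals maxd hle]
  unfold pvBRu
  rw [show PySem.List.pyRange 0 (maxd + 1) 1 = (List.range (maxd + 1).toNat).map (fun (k : Nat) => ((k : Int))) by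
    simp [PySem.List.pyRange_one]]
  rw [pvBRu_aux vals maxd (maxd + 1).toNat rfl (maxd + 1).toNat le_rfl]
  rw [pvTot vals 0 maxd hle, pvTot vals 1 maxd hle]

theorem pvBS_eq (vals : List Int) (d maxd : Int) (hd : 1 ≤ d) :
    pvBS d ((List.range (maxd + 1).toNat).map (fun (k : Nat) => pvPair vals (k : Int))) maxd =
      (List.range (maxd + 1).toNat).map (fun (t : Nat) => pvSfun vals d.toNat t) := by
  unfold pvBS
  rw [show PySem.List.pyRange 0 (maxd + 1) 1 = (List.range (maxd + 1).toNat).map (fun (k : Nat) => ((k : Int))) by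
    simp [PySem.List.pyRange_one]]
  exact pvBS_aux vals d maxd hd (maxd + 1).toNat rfl (maxd + 1).toNat le_rfl

-- ===== VERDICT (by name: the statement is the Claim_ definition above) =====
theorem solve_quadrant_spec : Claim_equal_solve_quadrant := by
  intro grid steps dists _ hpre
  unfold Spec_solve_quadrant
  obtain ⟨hv, hpre2⟩ := hpre
  simp only [solve_quadrant, solve_quadrant_alt]
  by_cases hs : steps < (grid.length : Int) + 1
  · rw [if_pos hs]
    simp only [pvLoopA]
    rw [if_pos (by omega : steps < (grid.length : Int) + 1 + 0 * (grid.length : Int))]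
  · rw [if_neg hs]
    have hd : 1 ≤ (grid.length : Int) := by
      rcases hpre2 with h | h
      · omega
      · exact h.1
    obtain ⟨m0, hm0⟩ : ∃ m0, PySem.List.max? (pvVals dists) (fun n => n) = some m0 := by
      cases hmx : PySem.List.max? (pvVals dists) (fun n => n) with
      | none => exact absurd ((PySem.List.max?_eq_none_iff _ _).mp hmx) hv
      | some m0 => exact ⟨m0, rfl⟩
    have hle : ∀ m ∈ pvVals dists, m ≤ (PySem.List.max? (pvVals dists) (fun n => n)).getD 0 := by
      rw [hm0]
      exact fun m hm => PySem.List.max?_isMax hm0 m hm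
    rw [pvRuA_eq, pvBRu_eq _ _ hle, pvBS_eq _ _ _ hd]
    exact pvLoop_eq (pvVals dists) _ _ _ _ steps hd _ 0 0
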